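-- pv_equiv track=rewrite | github.com/muneer-a/Assessment_Muneer | exercises/Hard/awarding prizes.py | award_prizes
-- ===== SOURCE A (Python) =====
-- def award_prizes(names):
--     list1=list(names.keys())
--     list1=sorted(list1,reverse=True,key=lambda x:names[x])
--     names[list1[0]] = 'Gold'
--     names[list1[1]] = 'Silver'
--     names[list1[2]] = 'Bronze'
--     for i in range(3,len(names)):
--         names[list1[i]]= 'Participation'
--     return names
-- ===== SOURCE B (Python) =====
-- def award_prizes(names):
--     # Single pass: maintain the top-3 (name, value) in descending value order,
--     # inserting a candidate only before strictly smaller values so earlier-seen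
--     # names win ties (same result as a stable descending sort).
--     top = []
--     for name, value in names.items():
--         i = 0
--         while i < len(top) and top[i][1] >= value:
--             i += 1
--         top.insert(i, (name, value))
--         del top[3:]
--     gold = top[0][0]
--     silver = top[1][0]
--     bronze = top[2][0]
--     for name in names:
--         if name == gold:
--             names[name] = 'Gold'
--         elif name == silver:
--             names[name] = 'Silver'
--         elif name == bronze:
--             names[name] = 'Bronze'
--         else:
--             names[name] = 'Participation'
--     return names
-- ===== Notes on version B (the rewrite author's own statement) =====
-- stated objective: alternative
-- what changed: A sorts all keys descending by value and indexes the sorted list; B never sorts: it makes one pass over the items maintaining only the current top-3 (inserting before strictly smaller values so earlier names win ties, matching the stable sort) and assigns prizes from that.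
import Mathlib
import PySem

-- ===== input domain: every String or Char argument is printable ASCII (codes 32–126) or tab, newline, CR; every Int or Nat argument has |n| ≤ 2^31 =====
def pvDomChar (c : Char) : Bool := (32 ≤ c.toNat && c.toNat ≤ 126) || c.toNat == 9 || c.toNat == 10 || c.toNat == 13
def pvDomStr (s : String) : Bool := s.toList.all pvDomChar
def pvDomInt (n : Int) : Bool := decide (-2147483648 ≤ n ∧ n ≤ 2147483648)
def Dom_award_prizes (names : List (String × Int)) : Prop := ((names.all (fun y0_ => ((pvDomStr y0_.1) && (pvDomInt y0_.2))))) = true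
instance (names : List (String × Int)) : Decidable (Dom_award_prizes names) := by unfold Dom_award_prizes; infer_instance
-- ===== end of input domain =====

-- B replaces A's full descending sort of all keys by a single pass that maintains only the
-- current top-3 entries; equivalence is proved on dicts with at least 3 keys (A raises
-- IndexError otherwise).  Both ports read the input association list as the Python dict
-- (PySem.Dict.ofList); A mutates the dict in place and returns it — the ports model the
-- RETURN value (exact, since every key gets assigned a prize and Python's dict assignment
-- overwrites in place, preserving the original key order).

-- ===== PORT A =====
def award_prizes (names : List (String × Int)) : List (String × String) :=
  let d := PySem.Dict.ofList names
  let list1 := PySem.Dict.keys d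
  let list1 := PySem.List.sorted list1 (fun x => PySem.Dict.getD d x 0) true
  -- the three assignments and the loop, collected in a side dict and read back in the
  -- original key order (= Python's in-place overwrite semantics)
  let a0 : PySem.Dict String String :=
    PySem.Dict.insert (PySem.Dict.insert (PySem.Dict.insert PySem.Dict.empty
      (PySem.List.pyGetD list1 0 "") "Gold")
      (PySem.List.pyGetD list1 1 "") "Silver")
      (PySem.List.pyGetD list1 2 "") "Bronze"
  let a1 := (PySem.List.pyRange 3 (PySem.Dict.size d : Int) 1).foldl
      (fun a i => PySem.Dict.insert a (PySem.List.pyGetD list1 i "") "Participation") a0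
  (PySem.Dict.items d).map (fun p => (p.1, PySem.Dict.getD a1 p.1 ""))

-- ===== PORT B =====
-- insert a candidate before the first incumbent with a strictly smaller value
-- (the while loop of Source B skips every incumbent with value ≥ the candidate's)
def insTop (x : String × Int) : List (String × Int) → List (String × Int)
  | [] => [x]
  | y :: ys => if y.2 < x.2 then x :: y :: ys else y :: insTop x ys

def award_prizes_alt (names : List (String × Int)) : List (String × String) :=
  let d := PySem.Dict.ofList names
  let top := (PySem.Dict.items d).foldl (fun t x => (insTop x t).take 3) []
  let gold := (PySem.List.pyGetD top 0 ("", 0)).1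
  let silver := (PySem.List.pyGetD top 1 ("", 0)).1
  let bronze := (PySem.List.pyGetD top 2 ("", 0)).1
  (PySem.Dict.items d).map (fun p => (p.1,
    if p.1 == gold then "Gold"
    else if p.1 == silver then "Silver"
    else if p.1 == bronze then "Bronze"
    else "Participation"))

-- ===== PRECONDITION & SPEC =====
-- Pre_ excludes only the dicts with fewer than 3 (distinct) keys, on which A raises
-- IndexError at names[list1[0..2]] (and B raises the same IndexError at top[0..2]).
def Pre_award_prizes (names : List (String × Int)) : Prop :=
  3 ≤ (PySem.List.dedup (names.map Prod.fst)).length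
instance (names : List (String × Int)) : Decidable (Pre_award_prizes names) := by
  unfold Pre_award_prizes; infer_instance

def pvWitness_award_prizes : (List (String × Int)) := [("ann", 5), ("bob", 2), ("cy", 9), ("di", 2)]

def Spec_award_prizes (names : List (String × Int)) (out : List (String × String)) : Prop := out = award_prizes_alt names
instance (names : List (String × Int)) (out : List (String × String)) : Decidable (Spec_award_prizes names out) := by unfold Spec_award_prizes; infer_instance

-- ===== CLAIM (what is proved, stated in full; the proofs are below) =====
def Claim_equal_award_prizes : Prop := ∀ (names : List (String × Int)), Dom_award_prizes names → Pre_award_prizes names → Spec_award_prizes names (award_prizes names)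

-- ===== LEMMAS AND PROOFS =====

theorem insTop_eq_insertBy (x : String × Int) (t : List (String × Int)) :
    insTop x t = PySem.List.insertBy (fun a b => decide (b.2 < a.2)) x t := by
  induction t with
  | nil => simp [insTop, PySem.List.insertBy]
  | cons y ys ih => simp [insTop, PySem.List.insertBy, ih]

theorem take_insTop (x : String × Int) :
    ∀ (t : List (String × Int)) (k : Nat), ((insTop x (t.take k)).take k) = (insTop x t).take k := by
  intro t
  induction t with
  | nil => intro k; simp
  | cons y ys ih =>
    intro k
    cases k with
    | zero => simp
    | succ j =>
      simp only [List.take_succ_cons, insTop]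
      by_cases h : y.2 < x.2
      · simp only [if_pos h, List.take_succ_cons]
        congr 1
        cases j with
        | zero => simp
        | succ i => simp [List.take_take]
      · simp only [if_neg h, List.take_succ_cons]
        congr 1
        exact ih j

theorem foldl_insTop_take (l : List (String × Int)) :
    l.foldl (fun t x => (insTop x t).take 3) []
      = (l.foldl (fun t x => insTop x t) []).take 3 := by
  suffices h : ∀ (l t : List (String × Int)),
      l.foldl (fun t x => (insTop x t).take 3) (t.take 3) = (l.foldl (fun t x => insTop x t) t).take 3 by
    simpa using h l []
  intro l
  induction l with
  | nil => intro t; simp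
  | cons a l ih =>
    intro t
    simp only [List.foldl_cons]
    rw [take_insTop a t 3, ← ih (insTop a t)]

theorem map_fst_insertBy (f : String → Int) (x : String × Int) (hx : f x.1 = x.2) :
    ∀ (acc : List (String × Int)), (∀ p ∈ acc, f p.1 = p.2) →
    PySem.List.insertBy (fun a b => decide (f b < f a)) x.1 (acc.map Prod.fst)
      = (PySem.List.insertBy (fun a b => decide (b.2 < a.2)) x acc).map Prod.fst := by
  intro acc
  induction acc with
  | nil => intro _; simp [PySem.List.insertBy]
  | cons y ys ih =>
    intro h
    have hy : f y.1 = y.2 := h y (by simp)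
    simp only [List.map_cons, PySem.List.insertBy, hx, hy]
    by_cases hc : y.2 < x.2
    · simp [hc]
    · simp only [hc, decide_false, Bool.false_eq_true, if_false, List.map_cons]
      rw [ih (fun p hp => h p (by simp [hp]))]

theorem foldl_insertBy_map_fst (f : String → Int) :
    ∀ (l acc : List (String × Int)), (∀ p ∈ l, f p.1 = p.2) → (∀ p ∈ acc, f p.1 = p.2) →
    (l.map Prod.fst).foldl (fun a x => PySem.List.insertBy (fun u v => decide (f v < f u)) x a) (acc.map Prod.fst)
      = (l.foldl (fun a x => PySem.List.insertBy (fun u v => decide (v.2 < u.2)) x a) acc).map Prod.fst := by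
  intro l
  induction l with
  | nil => intro acc _ _; simp
  | cons p l ih =>
    intro acc hl hacc
    simp only [List.map_cons, List.foldl_cons]
    rw [map_fst_insertBy f p (hl p (by simp)) acc hacc]
    apply ih _ (fun q hq => hl q (by simp [hq]))
    intro q hq
    rcases (PySem.List.mem_insertBy _ p q acc).1 hq with h | h
    · exact h ▸ hl p (by simp)
    · exact hacc q h

theorem sorted_fst_comm (f : String → Int) (ds : List (String × Int))
    (hd : ∀ p ∈ ds, f p.1 = p.2) :
    PySem.List.sorted (ds.map Prod.fst) f true = (PySem.List.sorted ds (fun p => p.2) true).map Prod.fst := by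
  rw [PySem.List.sorted_rev_eq_foldl_insertBy, PySem.List.sorted_rev_eq_foldl_insertBy]
  simpa using foldl_insertBy_map_fst f ds [] hd (by simp)

theorem getD_foldl_insert_const (v d0 : String) :
    ∀ (ks : List String) (a : PySem.Dict String String) (k : String),
    PySem.Dict.getD (ks.foldl (fun a x => PySem.Dict.insert a x v) a) k d0
      = if k ∈ ks then v else PySem.Dict.getD a k d0 := by
  intro ks
  induction ks with
  | nil => intro a k; simp
  | cons x ks ih =>
    intro a k
    simp only [List.foldl_cons, ih, PySem.Dict.getD_insert, List.mem_cons]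
    by_cases h1 : k ∈ ks
    · simp [h1]
    · by_cases h2 : k = x <;> simp [h1, h2]

theorem keys_ofList (l : List (String × Int)) :
    (PySem.Dict.ofList l).keys = PySem.List.dedup (l.map Prod.fst) := by
  induction l using List.reverseRecOn with
  | nil => simp [PySem.Dict.ofList, PySem.Dict.update, PySem.List.dedup]
  | append_singleton l p ih =>
    have hof : ∀ (m : List (String × Int)), PySem.Dict.ofList m = m.foldl (fun d q => d.insert q.1 q.2) PySem.Dict.empty := by
      intro m; simp [PySem.Dict.ofList, PySem.Dict.update]
    rw [hof, List.foldl_append, List.foldl_cons, List.foldl_nil, ← hof]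
    simp only [List.map_append, List.map_cons, List.map_nil, PySem.List.dedup_eq_ofList,
      PySem.Set.ofList_append_singleton]
    rw [PySem.Set.add_eq_ite]
    by_cases hc : (PySem.Dict.ofList l).contains p.1 = true
    · rw [PySem.Dict.keys_insert_of_contains _ _ hc]
      have : p.1 ∈ PySem.Set.ofList (l.map Prod.fst) := by
        rw [← PySem.List.dedup_eq_ofList, ← ih]
        exact (PySem.Dict.contains_iff_mem_keys _ _).1 hc
      simp [this, ih, PySem.List.dedup_eq_ofList]
    · rw [PySem.Dict.keys_insert_of_not_contains _ _ (by simpa using hc)]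
      have : p.1 ∉ PySem.Set.ofList (l.map Prod.fst) := by
        rw [← PySem.List.dedup_eq_ofList, ← ih]
        intro hmem
        exact hc ((PySem.Dict.contains_iff_mem_keys _ _).2 hmem)
      simp [this, ih, PySem.List.dedup_eq_ofList]

theorem mem_drop_iff_idx (L : List String) (hnd : L.Nodup) (t : Nat) (ht : t < L.length) (n : Nat) :
    L[t] ∈ L.drop n ↔ n ≤ t := by
  constructor
  · intro h
    rcases List.mem_iff_getElem.1 h with ⟨j, hj, hje⟩
    rw [List.getElem_drop] at hje
    have := (List.Nodup.getElem_inj_iff hnd).1 hje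
    omega
  · intro h
    apply List.mem_iff_getElem.2
    refine ⟨t - n, by simp; omega, ?_⟩
    rw [List.getElem_drop]
    congr 1
    omega

-- ===== VERDICT (by name: the statement is the Claim_ definition above) =====
set_option maxHeartbeats 1000000 in
theorem award_prizes_spec : Claim_equal_award_prizes := by
  intro names _hdom hpre
  unfold Spec_award_prizes Pre_award_prizes at *
  simp only [award_prizes, award_prizes_alt]
  set d := PySem.Dict.ofList names with hdd
  set ds := PySem.Dict.items d with hdsdef
  have hkeys : PySem.Dict.keys d = ds.map Prod.fst := rfl
  have hsize : PySem.Dict.size d = ds.length := rfl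
  have hndK : (PySem.Dict.keys d).Nodup := PySem.Dict.nodup_keys_ofList names
  have hd0 : ∀ p ∈ ds, PySem.Dict.getD d p.1 0 = p.2 := by
    intro p hp
    have h1 : d.get? p.1 = some p.2 := PySem.Dict.get?_of_mem_items d hp hndK
    simp [PySem.Dict.getD, h1]
  set S := PySem.List.sorted ds (fun p => p.2) true with hS
  set L := PySem.List.sorted (PySem.Dict.keys d) (fun x => PySem.Dict.getD d x 0) true with hL
  have hLS : L = S.map Prod.fst := by
    rw [hL, hS, hkeys]; exact sorted_fst_comm _ ds hd0
  have hndL : L.Nodup := (PySem.List.sorted_perm _ _ _).symm.nodup hndK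
  have hlen : L.length = ds.length := by
    rw [hL, PySem.List.length_sorted, hkeys, List.length_map]
  have h3 : 3 ≤ ds.length := by
    have hk2 : PySem.Dict.keys d = PySem.List.dedup (names.map Prod.fst) := keys_ofList names
    have : (PySem.Dict.keys d).length = ds.length := by rw [hkeys, List.length_map]
    rw [← this, hk2]; exact hpre
  have hSlen : S.length = ds.length := by rw [hS, PySem.List.length_sorted]
  have htop : ds.foldl (fun t x => (insTop x t).take 3) [] = S.take 3 := by
    rw [foldl_insTop_take]
    have he : (fun (t : List (String×Int)) (x : String×Int) => insTop x t)
        = fun t x => PySem.List.insertBy (fun a b => decide (b.2 < a.2)) x t := by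
      funext t x; exact insTop_eq_insertBy x t
    rw [he, hS, PySem.List.sorted_rev_eq_foldl_insertBy]
  rw [htop]
  apply List.map_congr_left
  intro p hp
  have hkmem : p.1 ∈ L := by
    rw [hLS]
    exact List.mem_map_of_mem ((PySem.List.mem_sorted ds (fun p => p.2) true p).2 hp)
  have ht : L.idxOf p.1 < L.length := List.idxOf_lt_length_of_mem hkmem
  have hkt : L[L.idxOf p.1] = p.1 := List.getElem_idxOf ht
  set t := L.idxOf p.1 with hT
  have hL3 : 3 ≤ L.length := by omega
  have hiff : ∀ j (hjl : j < L.length), (p.1 = L[j]) ↔ t = j := by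
    intro j hjl
    constructor
    · intro h
      exact (List.Nodup.getElem_inj_iff hndL).1 (hkt.trans h)
    · intro h
      rw [← hkt, (List.Nodup.getElem_inj_iff hndL).2 h]
  -- A side bound: d.size = L.length
  rw [hsize, ← hlen]
  rw [← List.foldl_map (f := fun i => PySem.List.pyGetD L i "")
        (g := fun a s => PySem.Dict.insert a s "Participation"),
      PySem.List.map_pyGetD_pyRange' L "" (by norm_num : (0:Int) ≤ 3),
      getD_foldl_insert_const]
  have hmem3 : p.1 ∈ L.drop (3:Int).toNat ↔ 3 ≤ t := by
    rw [← hkt]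
    exact mem_drop_iff_idx L hndL t ht 3
  -- index literals
  have eL : ∀ j (hj : j < L.length), PySem.List.pyGetD L (OfNat.ofNat j) "" = L[j]'hj := by
    intro j hj
    rw [PySem.List.pyGetD_ofNat', List.getD_eq_getElem _ _ hj]
  have eS : ∀ j (hj : j < 3), (PySem.List.pyGetD (S.take 3) (OfNat.ofNat j) ("", 0)).1 = L[j]'(by omega) := by
    intro j hj
    have hjS : j < S.length := by omega
    have h1 : j < (S.take 3).length := by simp [hSlen]; omega
    rw [PySem.List.pyGetD_ofNat', List.getD_eq_getElem _ _ h1, List.getElem_take]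
    have hgj : j < (S.map Prod.fst).length := by simpa using hjS
    rw [show L[j]'(by omega) = (S.map Prod.fst)[j]'hgj from List.getElem_of_eq hLS _, List.getElem_map]
  rw [eL 0 (by omega), eL 1 (by omega), eL 2 (by omega), eS 0 (by omega), eS 1 (by omega), eS 2 (by omega)]
  simp only [PySem.Dict.getD_insert, PySem.Dict.getD_empty, beq_iff_eq, hmem3,
    hiff 0 (by omega), hiff 1 (by omega), hiff 2 (by omega)]
  refine congrArg (fun v => (p.1, v)) ?_
  by_cases h0 : t = 0
  · simp [h0]
  · by_cases h1 : t = 1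
    · simp [h1]
    · by_cases h2 : t = 2
      · simp [h2]
      · have : 3 ≤ t := by omega
        simp [h0, h1, h2, this]
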